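-- pv_equiv track=rewrite | github.com/AGLtools/AGL-OCR | src/ai/ai_extractor.py | _build_chunks
-- ===== SOURCE A (Python) =====
-- from typing import Dict, List, Optional
--
-- def _split_text_by_size(text: str, target_chars: int = 12000) -> List[str]:
--     """Split a single text blob into roughly equal chunks at line boundaries."""
--     if len(text) <= target_chars:
--         return [text]
--     lines = text.splitlines(keepends=True)
--     chunks: List[str] = []
--     cur: List[str] = []
--     cur_len = 0
--     for line in lines:
--         if cur_len + len(line) > target_chars and cur:
--             chunks.append("".join(cur))
--             cur, cur_len = [], 0
--         cur.append(line)
--         cur_len += len(line)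
--     if cur:
--         chunks.append("".join(cur))
--     return chunks
--
-- def _build_chunks(pages: List[str], max_chars: int = 18000) -> List[str]:
--     """Group consecutive pages into chunks of up to max_chars characters.
--
--     Always keeps the first page in chunk #1 (so the AI sees the manifest header).
--     """
--     if not pages:
--         return []
--     chunks: List[str] = []
--     cur: List[str] = []
--     cur_len = 0
--     for i, p in enumerate(pages):
--         page_text = p or ""
--         # If a single page is itself too big, hard-split it
--         if len(page_text) > max_chars:
--             if cur:
--                 chunks.append("\n\n".join(cur))
--                 cur, cur_len = [], 0
--             chunks.extend(_split_text_by_size(page_text, target_chars=max_chars))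
--             continue
--         if cur_len + len(page_text) > max_chars and cur:
--             chunks.append("\n\n".join(cur))
--             cur, cur_len = [], 0
--         cur.append(page_text)
--         cur_len += len(page_text) + 2
--     if cur:
--         chunks.append("\n\n".join(cur))
--     return chunks
-- ===== SOURCE B (Python) =====
-- from typing import List
--
-- def _split_to_limit(text: str, limit: int) -> List[str]:
--     """Greedy line packing: grow the last piece while it fits, else start a new one."""
--     if len(text) <= limit:
--         return [text]
--     pieces: List[str] = []
--     for line in text.splitlines(keepends=True):
--         if pieces and len(pieces[-1]) + len(line) <= limit:
--             pieces[-1] += line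
--         else:
--             pieces.append(line)
--     return pieces
--
-- def _build_chunks(pages: List[str], max_chars: int = 18000) -> List[str]:
--     # pass 1: decide the grouping (buckets of pages / oversized pages), no rendering
--     groups = []  # ('bucket', [page, ...]) or ('big', page_text)
--     cur: List[str] = []
--     cur_len = 0
--     for p in pages:
--         t = p or ""
--         if len(t) > max_chars:
--             if cur:
--                 groups.append(('bucket', cur))
--                 cur, cur_len = [], 0
--             groups.append(('big', t))
--         elif cur and cur_len + len(t) > max_chars:
--             groups.append(('bucket', cur))
--             cur, cur_len = [t], len(t) + 2
--         else:
--             cur.append(t)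
--             cur_len += len(t) + 2
--     if cur:
--         groups.append(('bucket', cur))
--     # pass 2: render the group list into the chunk list
--     out: List[str] = []
--     for kind, val in groups:
--         if kind == 'bucket':
--             out.append("\n\n".join(val))
--         else:
--             out.extend(_split_to_limit(val, max_chars))
--     return out
-- ===== Notes on version B (the rewrite author's own statement) =====
-- stated objective: alternative
-- what changed: Replaces A's single render-while-scanning loop by a decide-then-render decomposition (first pass builds a tagged group list of page buckets and oversized pages, second pass renders it), and replaces the buffer-and-flush hard splitter by greedy grow-the-last-piece packing.
import Mathlib
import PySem

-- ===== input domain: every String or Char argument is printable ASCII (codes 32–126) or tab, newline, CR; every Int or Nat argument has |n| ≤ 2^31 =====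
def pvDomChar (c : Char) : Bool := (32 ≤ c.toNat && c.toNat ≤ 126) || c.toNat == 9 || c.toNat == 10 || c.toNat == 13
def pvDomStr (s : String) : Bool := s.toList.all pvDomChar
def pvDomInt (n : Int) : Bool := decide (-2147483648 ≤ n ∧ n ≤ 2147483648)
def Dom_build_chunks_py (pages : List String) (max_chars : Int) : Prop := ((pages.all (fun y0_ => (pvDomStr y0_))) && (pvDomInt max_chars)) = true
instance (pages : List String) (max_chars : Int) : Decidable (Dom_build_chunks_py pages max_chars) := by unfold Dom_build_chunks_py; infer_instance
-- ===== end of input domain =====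

-- B replaces A's render-while-scanning loop by a decide-then-render two-pass decomposition
-- (first pass tags groups, second pass renders), and packs split pieces by growing the last
-- piece instead of buffer-and-flush; objective: alternative (same cost, different structure).

-- ===== PORT A =====
-- hand port of Python str.splitlines(keepends=True): exact on the Dom charset,
-- where the only line breaks are '\n', '\r' and '\r\n' (shared by both ports, as
-- both Pythons call the same built-in).
def slk : List Char → List Char → List (List Char)
  | [], acc => if acc.isEmpty then [] else [acc.reverse]
  | '\r' :: '\n' :: rest, acc => (acc.reverse ++ ['\r', '\n']) :: slk rest []
  | '\r' :: rest, acc => (acc.reverse ++ ['\r']) :: slk rest []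
  | '\n' :: rest, acc => (acc.reverse ++ ['\n']) :: slk rest []
  | c :: rest, acc => slk rest (c :: acc)

-- one iteration of A's loop in _split_text_by_size (flush-then-append merged, as in the source)
def stepSplitA (target_chars : Int) (st : List String × List String × Int) (line : String) :
    List String × List String × Int :=
  if st.2.2 + PySem.Str.len line > target_chars ∧ st.2.1 ≠ [] then
    (st.1 ++ [PySem.Str.join "" st.2.1], [line], PySem.Str.len line)
  else
    (st.1, st.2.1 ++ [line], st.2.2 + PySem.Str.len line)

def split_text_by_size (text : String) (target_chars : Int) : List String :=
  if PySem.Str.len text ≤ target_chars then [text]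
  else
    let s := ((slk text.toList []).map String.mk).foldl (stepSplitA target_chars) ([], [], 0)
    if s.2.1 ≠ [] then s.1 ++ [PySem.Str.join "" s.2.1] else s.1

-- one iteration of A's loop in _build_chunks ('p or ""' ported as the if-expression)
def stepA (max_chars : Int) (st : List String × List String × Int) (p : String) :
    List String × List String × Int :=
  let page_text := if p = "" then "" else p
  if PySem.Str.len page_text > max_chars then
    ((if st.2.1 ≠ [] then st.1 ++ [PySem.Str.join "\n\n" st.2.1] else st.1) ++
       split_text_by_size page_text max_chars, [], 0)
  else if st.2.2 + PySem.Str.len page_text > max_chars ∧ st.2.1 ≠ [] then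
    (st.1 ++ [PySem.Str.join "\n\n" st.2.1], [page_text], PySem.Str.len page_text + 2)
  else
    (st.1, st.2.1 ++ [page_text], st.2.2 + PySem.Str.len page_text + 2)

def build_chunks_py (pages : List String) (max_chars : Int) : List String :=
  if pages = [] then []
  else
    let s := pages.foldl (stepA max_chars) ([], [], 0)
    if s.2.1 ≠ [] then s.1 ++ [PySem.Str.join "\n\n" s.2.1] else s.1

-- ===== PORT B =====
-- one iteration of B's packing loop: grow the last piece while it fits, else start a new one
def stepSplitB (limit : Int) (pieces : List String) (line : String) : List String :=
  match pieces.getLast? with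
  | some last =>
      if PySem.Str.len last + PySem.Str.len line ≤ limit then
        pieces.dropLast ++ [last ++ line]
      else pieces ++ [line]
  | none => pieces ++ [line]

def split_to_limit (text : String) (limit : Int) : List String :=
  if PySem.Str.len text ≤ limit then [text]
  else ((slk text.toList []).map String.mk).foldl (stepSplitB limit) []

-- one iteration of B's pass 1 (groups: Sum.inl = ('bucket', pages), Sum.inr = ('big', text))
def stepB (max_chars : Int) (st : List (List String ⊕ String) × List String × Int) (p : String) :
    List (List String ⊕ String) × List String × Int :=
  let t := if p = "" then "" else p
  if PySem.Str.len t > max_chars then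
    ((if st.2.1 ≠ [] then st.1 ++ [Sum.inl st.2.1] else st.1) ++ [Sum.inr t], [], 0)
  else if st.2.1 ≠ [] ∧ st.2.2 + PySem.Str.len t > max_chars then
    (st.1 ++ [Sum.inl st.2.1], [t], PySem.Str.len t + 2)
  else
    (st.1, st.2.1 ++ [t], st.2.2 + PySem.Str.len t + 2)

-- one iteration of B's pass 2 (render)
def renderStep (max_chars : Int) (out : List String) (g : List String ⊕ String) : List String :=
  match g with
  | Sum.inl b => out ++ [PySem.Str.join "\n\n" b]
  | Sum.inr t => out ++ split_to_limit t max_chars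

def build_chunks_py_alt (pages : List String) (max_chars : Int) : List String :=
  let s := pages.foldl (stepB max_chars) ([], [], 0)
  let groups := if s.2.1 ≠ [] then s.1 ++ [Sum.inl s.2.1] else s.1
  groups.foldl (renderStep max_chars) []

-- ===== PRECONDITION & SPEC =====
def Spec_build_chunks_py (pages : List String) (max_chars : Int) (out : List String) : Prop := out = build_chunks_py_alt pages max_chars
instance (pages : List String) (max_chars : Int) (out : List String) : Decidable (Spec_build_chunks_py pages max_chars out) := by unfold Spec_build_chunks_py; infer_instance

-- ===== CLAIM (what is proved, stated in full; the proofs are below) =====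
def Claim_equal_build_chunks_py : Prop := ∀ (pages : List String) (max_chars : Int), Dom_build_chunks_py pages max_chars → Spec_build_chunks_py pages max_chars (build_chunks_py pages max_chars)

-- ===== LEMMAS AND PROOFS =====
-- what one group contributes to the output
def rg (max_chars : Int) (g : List String ⊕ String) : List String :=
  match g with
  | Sum.inl b => [PySem.Str.join "\n\n" b]
  | Sum.inr t => split_to_limit t max_chars

-- A's loop-end flushes, written as functions of the loop state
def finS (s : List String × List String × Int) : List String :=
  if s.2.1 ≠ [] then s.1 ++ [PySem.Str.join "" s.2.1] else s.1

def finM (s : List String × List String × Int) : List String :=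
  if s.2.1 ≠ [] then s.1 ++ [PySem.Str.join "\n\n" s.2.1] else s.1

-- B's pass-1-end flush
def finG (s : List (List String ⊕ String) × List String × Int) : List (List String ⊕ String) :=
  if s.2.1 ≠ [] then s.1 ++ [Sum.inl s.2.1] else s.1

lemma render_eq (m : Int) (gs : List (List String ⊕ String)) (out : List String) :
    gs.foldl (renderStep m) out = out ++ gs.flatMap (rg m) := by
  induction gs generalizing out with
  | nil => simp
  | cons g gs ih =>
      cases g <;> simp [renderStep, rg, ih, List.append_assoc]

lemma str_len_append (a b : String) :
    PySem.Str.len (a ++ b) = PySem.Str.len a + PySem.Str.len b := by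
  simp [PySem.Str.len_eq]

lemma join_nil_flatten (ls : List (List Char)) : PySem.Chars.join [] ls = ls.flatten := by
  induction ls with
  | nil => simp [PySem.Chars.join_nil]
  | cons a tail ih =>
      cases tail with
      | nil => simp [PySem.Chars.join_singleton]
      | cons b t =>
          rw [PySem.Chars.join_cons_cons]
          simp [ih]

lemma join0_singleton (l : String) : PySem.Str.join "" [l] = l := by
  apply String.toList_inj.mp
  simp [PySem.Str.toList_join, PySem.Chars.join_singleton]

lemma join0_append (xs : List String) (l : String) :
    PySem.Str.join "" (xs ++ [l]) = PySem.Str.join "" xs ++ l := by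
  apply String.toList_inj.mp
  simp [PySem.Str.toList_join, join_nil_flatten]

lemma split_inv (t : Int) (lines : List String) :
    ∀ (chunks cur : List String), cur ≠ [] →
      finS (lines.foldl (stepSplitA t) (chunks, cur, PySem.Str.len (PySem.Str.join "" cur)))
        = lines.foldl (stepSplitB t) (chunks ++ [PySem.Str.join "" cur]) := by
  induction lines with
  | nil => intro chunks cur h; simp [finS, h]
  | cons line rest ih =>
      intro chunks cur h
      simp only [List.foldl_cons]
      by_cases hc : PySem.Str.len (PySem.Str.join "" cur) + PySem.Str.len line > t
      · have hA : stepSplitA t (chunks, cur, PySem.Str.len (PySem.Str.join "" cur)) line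
            = (chunks ++ [PySem.Str.join "" cur], [line], PySem.Str.len line) := by
          unfold stepSplitA; exact if_pos ⟨hc, h⟩
        have hB : stepSplitB t (chunks ++ [PySem.Str.join "" cur]) line
            = (chunks ++ [PySem.Str.join "" cur]) ++ [line] := by
          unfold stepSplitB
          rw [List.getLast?_concat]
          exact if_neg (by omega)
        rw [hA, hB]
        have h2 := ih (chunks ++ [PySem.Str.join "" cur]) [line] (by simp)
        rw [join0_singleton] at h2
        exact h2
      · have hA : stepSplitA t (chunks, cur, PySem.Str.len (PySem.Str.join "" cur)) line
            = (chunks, cur ++ [line], PySem.Str.len (PySem.Str.join "" (cur ++ [line]))) := by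
          unfold stepSplitA
          rw [join0_append, str_len_append]
          exact if_neg (fun hx => hc hx.1)
        have hB : stepSplitB t (chunks ++ [PySem.Str.join "" cur]) line
            = chunks ++ [PySem.Str.join "" (cur ++ [line])] := by
          unfold stepSplitB
          rw [List.getLast?_concat]
          exact (if_pos (by omega)).trans (by rw [List.dropLast_concat, join0_append])
        rw [hA, hB]
        exact ih chunks (cur ++ [line]) (by simp)

lemma split_eq (text : String) (t : Int) :
    split_text_by_size text t = split_to_limit text t := by
  unfold split_text_by_size split_to_limit
  by_cases hle : PySem.Str.len text ≤ t
  · rw [if_pos hle, if_pos hle]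
  · rw [if_neg hle, if_neg hle]
    show finS (((slk text.toList []).map String.mk).foldl (stepSplitA t) ([], [], 0))
        = ((slk text.toList []).map String.mk).foldl (stepSplitB t) []
    generalize ((slk text.toList []).map String.mk) = lines
    cases lines with
    | nil => simp [finS]
    | cons l ls =>
        simp only [List.foldl_cons]
        have hA : stepSplitA t ([], [], 0) l = ([], [l], 0 + PySem.Str.len l) := by
          unfold stepSplitA; exact if_neg (fun hx => hx.2 rfl)
        have hB : stepSplitB t [] l = [l] := by
          unfold stepSplitB; rfl
        rw [hA, hB, zero_add]
        have h2 := split_inv t ls [] [l] (by simp)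
        rw [join0_singleton] at h2
        simpa using h2

lemma main_inv (m : Int) (pages : List String) :
    ∀ (groups : List (List String ⊕ String)) (cur : List String) (cur_len : Int),
      finM (pages.foldl (stepA m) (groups.flatMap (rg m), cur, cur_len))
        = (finG (pages.foldl (stepB m) (groups, cur, cur_len))).foldl (renderStep m) [] := by
  induction pages with
  | nil =>
      intro groups cur cur_len
      by_cases h : cur = [] <;>
        simp [finM, finG, h, render_eq, renderStep]
  | cons p rest ih =>
      intro groups cur cur_len
      simp only [List.foldl_cons]
      by_cases hbig : PySem.Str.len (if p = "" then "" else p) > m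
      · have hA : stepA m (groups.flatMap (rg m), cur, cur_len) p
            = (((if cur ≠ [] then groups ++ [Sum.inl cur] else groups)
                ++ [Sum.inr (if p = "" then "" else p)]).flatMap (rg m), [], 0) := by
          have e : ((if cur ≠ [] then groups ++ [Sum.inl cur] else groups)
                ++ [Sum.inr (if p = "" then "" else p)]).flatMap (rg m)
              = (if cur ≠ [] then groups.flatMap (rg m) ++ [PySem.Str.join "\n\n" cur]
                  else groups.flatMap (rg m))
                ++ split_text_by_size (if p = "" then "" else p) m := by
            by_cases h : cur = [] <;> simp [h, split_eq, rg, List.flatMap_append]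
          rw [e]; unfold stepA; exact if_pos hbig
        have hB : stepB m (groups, cur, cur_len) p
            = ((if cur ≠ [] then groups ++ [Sum.inl cur] else groups)
                ++ [Sum.inr (if p = "" then "" else p)], [], 0) := by
          unfold stepB; exact if_pos hbig
        rw [hA, hB]
        exact ih _ [] 0
      · by_cases hfl : cur ≠ [] ∧ cur_len + PySem.Str.len (if p = "" then "" else p) > m
        · have hA : stepA m (groups.flatMap (rg m), cur, cur_len) p
              = ((groups ++ [Sum.inl cur]).flatMap (rg m), [if p = "" then "" else p],
                  PySem.Str.len (if p = "" then "" else p) + 2) := by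
            have e : (groups ++ [Sum.inl cur]).flatMap (rg m)
                = groups.flatMap (rg m) ++ [PySem.Str.join "\n\n" cur] := by
              simp [rg, List.flatMap_append]
            rw [e]; unfold stepA
            exact (if_neg hbig).trans (if_pos ⟨hfl.2, hfl.1⟩)
          have hB : stepB m (groups, cur, cur_len) p
              = (groups ++ [Sum.inl cur], [if p = "" then "" else p],
                  PySem.Str.len (if p = "" then "" else p) + 2) := by
            unfold stepB; exact (if_neg hbig).trans (if_pos hfl)
          rw [hA, hB]
          exact ih _ _ _
        · have hA : stepA m (groups.flatMap (rg m), cur, cur_len) p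
              = (groups.flatMap (rg m), cur ++ [if p = "" then "" else p],
                  cur_len + PySem.Str.len (if p = "" then "" else p) + 2) := by
            unfold stepA
            exact (if_neg hbig).trans (if_neg (fun hx => hfl ⟨hx.2, hx.1⟩))
          have hB : stepB m (groups, cur, cur_len) p
              = (groups, cur ++ [if p = "" then "" else p],
                  cur_len + PySem.Str.len (if p = "" then "" else p) + 2) := by
            unfold stepB; exact (if_neg hbig).trans (if_neg hfl)
          rw [hA, hB]
          exact ih _ _ _

-- ===== VERDICT (by name: the statement is the Claim_ definition above) =====
theorem build_chunks_py_spec : Claim_equal_build_chunks_py := by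
  intro pages max_chars _
  unfold Spec_build_chunks_py build_chunks_py build_chunks_py_alt
  by_cases hp : pages = []
  · subst hp; simp
  · rw [if_neg hp]
    show finM (pages.foldl (stepA max_chars) ([], [], 0))
        = (finG (pages.foldl (stepB max_chars) ([], [], 0))).foldl (renderStep max_chars) []
    have h2 := main_inv max_chars pages [] [] 0
    simpa using h2
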